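-- pv_equiv track=rewrite | github.com/khughitt/science | scripts/audit_downstream_project_inventory.py | _porcelain_summary
-- ===== SOURCE A (Python) =====
-- from collections import Counter
--
-- def _porcelain_summary(lines: list[str]) -> dict[str, int]:
--     counter: Counter[str] = Counter()
--     for line in lines:
--         if not line:
--             continue
--         code = line[:2].strip() or "??"
--         counter[code] += 1
--     return dict(sorted(counter.items()))
-- ===== SOURCE B (Python) =====
-- def _group_runs(codes):
--     if not codes:
--         return []
--     c = codes[0]
--     i = 1
--     while i < len(codes) and codes[i] == c:
--         i += 1
--     return [(c, i)] + _group_runs(codes[i:])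
--
--
-- def _porcelain_summary(lines: list[str]) -> dict[str, int]:
--     codes = sorted(line[:2].strip() or "??" for line in lines if line)
--     return dict(_group_runs(codes))
-- ===== Notes on version B (the rewrite author's own statement) =====
-- stated objective: alternative
-- what changed: Replaces the Counter hash accumulation followed by dict(sorted(...)) with sorting the extracted codes first and grouping consecutive equal runs into counts, which yields the keys already in sorted order.
import Mathlib
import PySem

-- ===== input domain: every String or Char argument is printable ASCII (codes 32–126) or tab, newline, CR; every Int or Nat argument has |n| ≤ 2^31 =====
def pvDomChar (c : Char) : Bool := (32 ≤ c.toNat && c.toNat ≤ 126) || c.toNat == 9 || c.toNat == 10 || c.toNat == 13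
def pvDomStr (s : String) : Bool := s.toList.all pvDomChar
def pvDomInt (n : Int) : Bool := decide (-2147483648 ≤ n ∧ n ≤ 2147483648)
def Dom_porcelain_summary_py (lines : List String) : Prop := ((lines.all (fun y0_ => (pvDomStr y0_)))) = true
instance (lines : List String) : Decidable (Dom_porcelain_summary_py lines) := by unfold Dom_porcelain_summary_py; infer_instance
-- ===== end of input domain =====

-- B replaces A's Counter hash accumulation + dict(sorted(...)) by sorting the extracted
-- codes first and grouping consecutive equal runs into counts (alternative strategy, same cost class).

-- shared helper: 'line[:2].strip() or "??"' (identical expression in both Pythons)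
def pvCode (line : String) : String :=
  let s := PySem.Str.strip (PySem.Str.slice line none (some 2))
  if s = "" then "??" else s

-- ===== PORT A =====
def porcelain_summary_py (lines : List String) : List (String × Int) :=
  let counter : PySem.Dict String Int :=
    lines.foldl (fun d line =>
      if line = "" then d
      else d.modify (pvCode line) 0 (· + 1)) PySem.Dict.empty
  PySem.List.sorted2 counter.items (fun p => p.1) (fun p => p.2)

-- ===== PORT B =====
-- '_group_runs': leading-run length counted by the while loop, then recursion on the remainder
def pvRunLen (c : String) : List String → Nat
  | [] => 0
  | x :: xs => if x = c then pvRunLen c xs + 1 else 0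

def pvGroupRuns : List String → List (String × Int)
  | [] => []
  | c :: rest =>
      let i := pvRunLen c rest + 1
      (c, (i : Int)) :: pvGroupRuns ((c :: rest).drop i)
  termination_by l => l.length
  decreasing_by simp

def porcelain_summary_py_alt (lines : List String) : List (String × Int) :=
  let codes := PySem.List.sorted ((lines.filter (fun l => !(l == ""))).map pvCode) (fun x => x)
  (PySem.Dict.ofList (pvGroupRuns codes)).items

-- ===== PRECONDITION & SPEC =====
def Spec_porcelain_summary_py (lines : List String) (out : List (String × Int)) : Prop := out = porcelain_summary_py_alt lines
instance (lines : List String) (out : List (String × Int)) : Decidable (Spec_porcelain_summary_py lines out) := by unfold Spec_porcelain_summary_py; infer_instance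

-- ===== CLAIM (what is proved, stated in full; the proofs are below) =====
def Claim_equal_porcelain_summary_py : Prop := ∀ (lines : List String), Dom_porcelain_summary_py lines → Spec_porcelain_summary_py lines (porcelain_summary_py lines)

-- ===== LEMMAS AND PROOFS =====

-- A's accumulation loop is Counter of the extracted-code list
theorem pvA_counter (lines : List String) : ∀ d : PySem.Dict String Int,
    lines.foldl (fun d line => if line = "" then d else d.modify (pvCode line) 0 (· + 1)) d
      = ((lines.filter (fun l => !(l == ""))).map pvCode).foldl (fun d c => d.modify c 0 (· + 1)) d := by
  induction lines with
  | nil => intro d; rfl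
  | cons x xs ih =>
      intro d
      by_cases hx : x = ""
      · simpa [hx] using ih d
      · simp [hx, ih]

-- insertBy only looks at the comparison with members of the accumulator
theorem pvInsertBy_congr {α : Type} (f g : α → α → Bool) (x : α) (ys : List α)
    (h : ∀ y ∈ ys, f x y = g x y) :
    PySem.List.insertBy f x ys = PySem.List.insertBy g x ys := by
  induction ys with
  | nil => rfl
  | cons y ys ih =>
      simp [PySem.List.insertBy, h y (by simp)]
      split <;> simp_all

theorem pvInsertBy_perm {α : Type} (f : α → α → Bool) (x : α) (ys : List α) :
    (PySem.List.insertBy f x ys).Perm (x :: ys) := by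
  induction ys with
  | nil => simp [PySem.List.insertBy]
  | cons y ys ih =>
      simp only [PySem.List.insertBy]
      split
      · exact List.Perm.refl _
      · exact (ih.cons y).trans (List.Perm.swap x y ys)

-- on a list of pairs whose first components are pairwise distinct, Python's lexicographic
-- tuple sort coincides with sorting by the first component
theorem pvSorted2_eq_sorted (xs : List (String × Int)) (h : (xs.map Prod.fst).Nodup) :
    PySem.List.sorted2 xs (fun p => p.1) (fun p => p.2)
      = PySem.List.sorted xs (fun p => p.1) := by
  rw [PySem.List.sorted_eq_foldl_insertBy]
  show xs.foldl (fun acc x => PySem.List.insertBy _ x acc) [] = _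
  suffices H : ∀ (xs acc : List (String × Int)), ((acc ++ xs).map Prod.fst).Nodup →
      xs.foldl (fun acc x => PySem.List.insertBy
        (fun a b => decide (a.1 < b.1) || !decide (b.1 < a.1) && decide (a.2 < b.2)) x acc) acc
      = xs.foldl (fun acc x => PySem.List.insertBy (fun a b => decide (a.1 < b.1)) x acc) acc by
    exact H xs [] (by simpa using h)
  intro xs
  induction xs with
  | nil => intro acc _; rfl
  | cons x rest ih =>
      intro acc hnd
      have hx : ∀ y ∈ acc, x.1 ≠ y.1 := by
        intro y hy hxy
        rw [List.map_append, List.nodup_append] at hnd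
        exact hnd.2.2 y.1 (List.mem_map_of_mem hy) x.1 (by simp) (by rw [hxy])
      have hcong : PySem.List.insertBy
          (fun a b => decide (a.1 < b.1) || !decide (b.1 < a.1) && decide (a.2 < b.2)) x acc
          = PySem.List.insertBy (fun a b => decide (a.1 < b.1)) x acc := by
        apply pvInsertBy_congr
        intro y hy
        rcases lt_trichotomy x.1 y.1 with hlt | heq | hgt
        · simp [hlt, not_lt_of_gt hlt]
        · exact absurd heq (hx y hy)
        · simp [hgt, not_lt_of_gt hgt]
      simp only [List.foldl_cons, hcong]
      apply ih
      have h1 : (PySem.List.insertBy (fun a b => decide (a.1 < b.1)) x acc ++ rest).Perm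
          ((x :: acc) ++ rest) := (pvInsertBy_perm _ x acc).append_right rest
      have h2 : ((x :: acc) ++ rest).Perm (acc ++ x :: rest) := by
        show (x :: (acc ++ rest)).Perm (acc ++ x :: rest)
        exact List.perm_middle.symm
      exact (((h1.trans h2).map Prod.fst).symm).nodup hnd

-- the leading run of a list consists of copies of its head
theorem pvRunLen_take (c : String) (rest : List String) :
    rest.take (pvRunLen c rest) = List.replicate (pvRunLen c rest) c := by
  induction rest with
  | nil => rfl
  | cons x xs ih =>
      by_cases hx : x = c <;> simp [pvRunLen, hx, List.replicate_succ, ih]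

-- in a ≤-sorted list, nothing after the leading run equals the head
theorem pvRunLen_drop_count (c : String) (rest : List String)
    (h : (c :: rest).Pairwise (· ≤ ·)) :
    (rest.drop (pvRunLen c rest)).count c = 0 := by
  induction rest with
  | nil => rfl
  | cons x xs ih =>
      rcases List.pairwise_cons.mp h with ⟨h1, h2⟩
      by_cases hx : x = c
      · have hr : pvRunLen c (x :: xs) = pvRunLen c xs + 1 := by simp [pvRunLen, hx]
        rw [hr, List.drop_succ_cons]
        apply ih
        rw [hx] at h2
        exact h2
      · have hr : pvRunLen c (x :: xs) = 0 := by simp [pvRunLen, hx]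
        rw [hr, List.drop_zero]
        have hcx : c < x := lt_of_le_of_ne (h1 x (by simp)) (fun he => hx he.symm)
        rcases List.pairwise_cons.mp h2 with ⟨h3, _⟩
        have hz : List.count c xs = 0 :=
          List.count_eq_zero.mpr (fun hc => absurd rfl (ne_of_gt (lt_of_lt_of_le hcx (h3 c hc))))
        rw [List.count_cons, hz]
        simp [fun h : x = c => hx h]

theorem pvCount_drop (c k : String) (rest : List String) (hk : k ≠ c) :
    rest.count k = (rest.drop (pvRunLen c rest)).count k := by
  conv_lhs => rw [← List.take_append_drop (pvRunLen c rest) rest]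
  rw [List.count_append, pvRunLen_take, List.count_replicate]
  simp
  intro h
  exact absurd h.symm hk

theorem pvMem_drop (c k : String) (rest : List String) (hk : k ≠ c) :
    k ∈ rest ↔ k ∈ rest.drop (pvRunLen c rest) := by
  conv_lhs => rw [← List.take_append_drop (pvRunLen c rest) rest]
  rw [List.mem_append, pvRunLen_take]
  constructor
  · rintro (h | h)
    · exact absurd (List.eq_of_mem_replicate h) hk
    · exact h
  · exact fun h => Or.inr h

-- core characterisation of the grouping pass on a ≤-sorted list
theorem pvGroupRuns_spec (s : List String) : s.Pairwise (· ≤ ·) →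
    (∀ p : String × Int, p ∈ pvGroupRuns s ↔ p.1 ∈ s ∧ p.2 = (s.count p.1 : Int)) ∧
    (pvGroupRuns s).Pairwise (fun a b => a.1 < b.1) := by
  induction s using pvGroupRuns.induct with
  | case1 => simp [pvGroupRuns]
  | case2 c rest i IHgen =>
    intro hs
    have hi : i = pvRunLen c rest + 1 := rfl
    rw [hi, List.drop_succ_cons] at IHgen
    have hunf : pvGroupRuns (c :: rest)
        = (c, ((pvRunLen c rest + 1 : Nat) : Int)) :: pvGroupRuns (rest.drop (pvRunLen c rest)) := by
      rw [pvGroupRuns, List.drop_succ_cons]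
    have hsub : (rest.drop (pvRunLen c rest)).Sublist (c :: rest) :=
      (List.drop_sublist _ rest).trans (List.sublist_cons_self c rest)
    have hts := List.Pairwise.sublist hsub hs
    obtain ⟨IHmem, IHpw⟩ := IHgen hts
    have hct : (rest.drop (pvRunLen c rest)).count c = 0 := pvRunLen_drop_count c rest hs
    have hcnot : c ∉ rest.drop (pvRunLen c rest) := List.count_eq_zero.mp hct
    have hrc : rest.count c = pvRunLen c rest := by
      conv_lhs => rw [← List.take_append_drop (pvRunLen c rest) rest]
      rw [List.count_append, pvRunLen_take, List.count_replicate]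
      simp [hct]
    have hcs : (c :: rest).count c = pvRunLen c rest + 1 := by
      rw [List.count_cons, hrc]
      simp
    have hkey : ∀ k : String, k ≠ c → List.count k (c :: rest) = List.count k (rest.drop (pvRunLen c rest)) := by
      intro k hk
      rw [List.count_cons, ← pvCount_drop c k rest hk]
      simp
      exact fun h => hk h.symm
    have hmemk : ∀ k : String, k ≠ c → (k ∈ (c :: rest) ↔ k ∈ rest.drop (pvRunLen c rest)) := by
      intro k hk
      rw [List.mem_cons, ← pvMem_drop c k rest hk]
      simp [fun h : k = c => hk h]
    constructor
    · intro p
      rw [hunf]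
      simp only [List.mem_cons, IHmem]
      constructor
      · rintro (rfl | ⟨hp1, hp2⟩)
        · exact ⟨by simp, by rw [hcs]⟩
        · have hne : p.1 ≠ c := fun he => hcnot (he ▸ hp1)
          exact ⟨List.mem_cons.mp ((hmemk p.1 hne).mpr hp1), by rw [hp2, hkey p.1 hne]⟩
      · rintro ⟨hp1, hp2⟩
        by_cases he : p.1 = c
        · left
          obtain ⟨p1, p2⟩ := p
          simp only at he hp2 ⊢
          subst he
          rw [hp2, hcs]
        · exact Or.inr ⟨(hmemk p.1 he).mp (List.mem_cons.mpr hp1), by rw [hp2, hkey p.1 he]⟩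
    · rw [hunf]
      refine List.pairwise_cons.mpr ⟨?_, IHpw⟩
      intro q hq
      have hq1 : q.1 ∈ rest.drop (pvRunLen c rest) := ((IHmem q).mp hq).1
      have hle : c ≤ q.1 := (List.pairwise_cons.mp hs).1 q.1 (List.mem_of_mem_drop hq1)
      show c < q.1
      refine lt_of_le_of_ne hle ?_
      intro he
      rw [← he] at hq1
      exact hcnot hq1

-- ===== VERDICT (by name: the statement is the Claim_ definition above) =====
theorem porcelain_summary_py_spec : Claim_equal_porcelain_summary_py := by
  intro lines _
  unfold Spec_porcelain_summary_py porcelain_summary_py porcelain_summary_py_alt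
  simp only []
  set cs := (lines.filter (fun l => !(l == ""))).map pvCode with hcs
  set s := PySem.List.sorted cs (fun x => x) with hsrt
  set L := pvGroupRuns s with hL
  have hsp : s.Pairwise (· ≤ ·) := by
    simpa using PySem.List.sorted_pairwise cs (fun x => x)
  obtain ⟨hmem, hpw⟩ := pvGroupRuns_spec s hsp
  have hsperm : s.Perm cs := PySem.List.sorted_perm cs (fun x => x) false
  rw [pvA_counter, ← PySem.Dict.counter_eq_foldl, PySem.Dict.items_counter, ← hcs]
  set items := (PySem.Set.ofList cs).map (fun k => (k, (cs.count k : Int))) with hitems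
  have hLnodup : L.Nodup := hpw.imp (fun h => by
    intro he
    rw [he] at h
    exact lt_irrefl _ h)
  have hitemsnodup : items.Nodup :=
    (PySem.Set.nodup_ofList cs).map (fun a b hab => by
      simpa using congrArg Prod.fst hab)
  have hmm : ∀ p : String × Int, p ∈ L ↔ p ∈ items := by
    intro p
    rw [hmem p, hitems]
    constructor
    · rintro ⟨h1, h2⟩
      refine List.mem_map.mpr ⟨p.1, (PySem.Set.mem_ofList cs p.1).mpr (hsperm.mem_iff.mp h1), ?_⟩
      rw [← hsperm.count_eq, ← h2]
    · rintro hp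
      rcases List.mem_map.mp hp with ⟨k, hk, hkp⟩
      rw [← hkp]
      exact ⟨hsperm.mem_iff.mpr ((PySem.Set.mem_ofList cs k).mp hk), by simp [hsperm.count_eq]⟩
  have hperm : L.Perm items := (List.perm_ext_iff_of_nodup hLnodup hitemsnodup).mpr hmm
  have hfstnodup : (items.map Prod.fst).Nodup := by
    have hid : items.map Prod.fst = PySem.Set.ofList cs := by
      rw [hitems, List.map_map]
      have : (Prod.fst ∘ fun k => (k, (cs.count k : Int))) = id := rfl
      rw [this, List.map_id]
    rw [hid]
    exact PySem.Set.nodup_ofList cs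
  rw [pvSorted2_eq_sorted items hfstnodup,
      PySem.List.sorted_eq_of_perm_of_pairwise_lt items L (fun p => p.1) hperm hpw]
  have hLfst : (L.map Prod.fst).Nodup := by
    have hplt : (L.map Prod.fst).Pairwise (· < ·) := List.pairwise_map.mpr hpw
    exact hplt.imp ne_of_lt
  have hfresh : ∀ a ∈ L, (PySem.Dict.empty : PySem.Dict String Int).contains a.1 = false := by
    intro a _
    simp [PySem.Dict.contains_empty]
  have hB : (PySem.Dict.ofList L).items = L := by
    have h := PySem.Dict.items_foldl_insert_fresh L Prod.fst Prod.snd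
      (PySem.Dict.empty : PySem.Dict String Int) hfresh hLfst
    simpa [PySem.Dict.ofList, PySem.Dict.update] using h
  exact hB.symm
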